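-- pv_equiv track=rewrite | github.com/zdxdsw/Automated-Story-Generation-with-BERT | BERT-fill-compute-BLEU/Score_sentence.py | E2S
-- ===== SOURCE A (Python) =====
-- from itertools import product
--
-- def E2S(event, max_masks):
--     '''
--     Args:
--         event(string): A string representing an event, without [CLS], [SEP], or period.
--         max_masks(int): The maximum number of masks that is allowed between every two consecutive tokens.
--         i.e. at each blank the possible number of masks is in the range [1, max_masks]
--     Returns:
--         sentences(list): A list of strings, each string is a sentence created by inserting [MASK]s between some tokens of the event in a certain way
--     '''
--     sentences = []
--     event = event.rstrip()
--     event = event.split(" ")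
--     l = len(event)
--     for m in product([i for i in range(0,max_masks+1)],repeat = l+1):
--         loc=l
--         sen = event[:]
--         while loc>=0:
--             for i in range(m[loc]):
--                 sen.insert(loc,'[MASK]')
--             loc -= 1
--         sen.append('.')
--         sentences.append(" ".join(sen))
--     return sentences
-- ===== SOURCE B (Python) =====
-- def _go(tokens, max_masks, gap, prefix, out):
--     l = len(tokens)
--     if gap > l:
--         out.append(" ".join(prefix + ["."]))
--         return
--     for k in range(max_masks + 1):
--         ext = prefix + ["[MASK]"] * k
--         if gap < l:
--             _go(tokens, max_masks, gap + 1, ext + [tokens[gap]], out)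
--         else:
--             _go(tokens, max_masks, gap + 1, ext, out)
--
--
-- def E2S(event, max_masks):
--     tokens = event.rstrip().split(" ")
--     out = []
--     _go(tokens, max_masks, 0, [], out)
--     return out
-- ===== Notes on version B (the rewrite author's own statement) =====
-- stated objective: alternative
-- what changed: Replaces the itertools.product enumeration with backward in-place list inserts by a recursive DFS over the l+1 gaps that builds each sentence front-to-back by appending masks and tokens.
import Mathlib
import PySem

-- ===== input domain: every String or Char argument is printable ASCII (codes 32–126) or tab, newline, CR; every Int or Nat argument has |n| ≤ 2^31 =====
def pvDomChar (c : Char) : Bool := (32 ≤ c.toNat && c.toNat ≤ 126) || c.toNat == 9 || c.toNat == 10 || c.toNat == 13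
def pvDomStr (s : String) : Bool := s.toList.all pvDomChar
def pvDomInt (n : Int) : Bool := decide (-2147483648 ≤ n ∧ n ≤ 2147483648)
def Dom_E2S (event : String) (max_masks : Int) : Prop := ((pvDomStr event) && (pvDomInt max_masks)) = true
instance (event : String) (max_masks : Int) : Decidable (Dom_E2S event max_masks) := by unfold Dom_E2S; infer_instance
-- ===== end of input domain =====

-- B is an alternative decomposition: a recursive DFS over the l+1 gaps building each
-- sentence front-to-back, instead of itertools.product plus backward in-place inserts.

-- ===== PORT A =====

-- itertools.product(pool, repeat = n): lexicographic, last coordinate fastest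
def prodA (pool : List Int) : Nat → List (List Int)
  | 0 => [[]]
  | n + 1 => pool.flatMap (fun x => (prodA pool n).map (fun t => x :: t))

-- one iteration of the inner 'for i in range(m[loc]): sen.insert(loc,'[MASK]')'
def aStep (m : List Int) (loc : Nat) (sen : List String) : List String :=
  (PySem.List.pyRange 0 ((PySem.List.pyGet? m (loc : Int)).getD 0) 1).foldl
    (fun s _ => PySem.List.insert s (loc : Int) "[MASK]") sen

-- the 'while loc >= 0' loop, loc counting down from l to 0
def aWhile (m : List Int) : Nat → List String → List String
  | 0, sen => aStep m 0 sen
  | loc + 1, sen => aWhile m loc (aStep m (loc + 1) sen)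

def E2S (event : String) (max_masks : Int) : List String :=
  let ev := (PySem.Str.split? (PySem.Str.rstrip event) " ").getD []  -- sep " " ≠ "", so split? is always some
  let l := ev.length
  (prodA (PySem.List.pyRange 0 (max_masks + 1) 1) (l + 1)).foldl
    (fun sentences m =>
      let sen := aWhile m l ev
      sentences ++ [PySem.Str.join " " (sen ++ ["."])]) []

-- ===== PORT B =====

-- DFS over the gaps: 'rest' = tokens not yet placed; at each gap try k masks
def goB (mm : Int) : List String → List String → List String
  | rest, prefixToks =>
    (PySem.List.pyRange 0 (mm + 1) 1).foldl
      (fun acc k =>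
        let ext := prefixToks ++ List.replicate k.toNat "[MASK]"
        acc ++ (match rest with
                | t :: rs => goB mm rs (ext ++ [t])
                | [] => [PySem.Str.join " " (ext ++ ["."])])) []
  termination_by rest _ => rest.length
  decreasing_by simp

def E2S_alt (event : String) (max_masks : Int) : List String :=
  let tokens := (PySem.Str.split? (PySem.Str.rstrip event) " ").getD []  -- sep " " ≠ "", so split? is always some
  goB max_masks tokens []

-- ===== PRECONDITION & SPEC =====
def Spec_E2S (event : String) (max_masks : Int) (out : List String) : Prop := out = E2S_alt event max_masks
instance (event : String) (max_masks : Int) (out : List String) : Decidable (Spec_E2S event max_masks out) := by unfold Spec_E2S; infer_instance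

-- ===== CLAIM (what is proved, stated in full; the proofs are below) =====
def Claim_equal_E2S : Prop := ∀ (event : String) (max_masks : Int), Dom_E2S event max_masks → Spec_E2S event max_masks (E2S event max_masks)

-- ===== LEMMAS AND PROOFS =====

-- the common spec: masks interleaved with tokens (m has one more entry than the tokens)
def render : List Int → List String → List String
  | [], _ => []
  | k :: _, [] => List.replicate k.toNat "[MASK]"
  | k :: m, t :: ts => List.replicate k.toNat "[MASK]" ++ t :: render m ts

theorem prodA_length {pool : List Int} : ∀ {n : Nat} {m : List Int}, m ∈ prodA pool n → m.length = n := by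
  intro n
  induction n with
  | zero => intro m h; simp [prodA] at h; simp [h]
  | succ n ih =>
    intro m h
    simp only [prodA, List.mem_flatMap, List.mem_map] at h
    obtain ⟨x, _, t, ht, rfl⟩ := h
    simp [ih ht]

theorem foldl_iterate {α β : Type} (g : α → α) (l : List β) (s : α) :
    l.foldl (fun a _ => g a) s = g^[l.length] s := by
  induction l generalizing s with
  | nil => rfl
  | cons x xs ih => simp [List.foldl, ih, Function.iterate_succ_apply]

theorem iterate_insert (loc : Nat) (v : String) :
    ∀ (n : Nat) (sen : List String), loc ≤ sen.length →
    (fun s => PySem.List.insert s (loc : Int) v)^[n] sen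
      = sen.take loc ++ List.replicate n v ++ sen.drop loc := by
  intro n
  induction n with
  | zero => intro sen h; simp
  | succ n ih =>
    intro sen h
    rw [Function.iterate_succ_apply', ih _ h]
    rw [PySem.List.insert_natCast _ _ _ (by simp; omega)]
    have hA : (sen.take loc).length = loc := by simp; omega
    rw [List.append_assoc, List.take_left' hA, List.drop_left' hA]
    simp [List.replicate_succ]

theorem aStep_eq (m : List Int) (loc : Nat) (sen : List String) (h : loc ≤ sen.length) :
    aStep m loc sen =
      sen.take loc ++ List.replicate ((PySem.List.pyGet? m (loc : Int)).getD 0).toNat "[MASK]" ++ sen.drop loc := by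
  unfold aStep
  rw [foldl_iterate, PySem.List.length_pyRange_one, iterate_insert _ _ _ _ h]
  norm_num

theorem aStep_cons (m : List Int) (loc : Nat) (t : String) (rest : List String) (h : loc ≤ rest.length) :
    aStep m (loc + 1) (t :: rest) = t :: aStep (m.drop 1) loc rest := by
  have h1 : ((loc + 1 : Nat) : Int) = ((loc : Nat) : Int) + 1 := by push_cast; ring
  rw [show aStep m (loc+1) (t::rest) = aStep m (loc+1) (t::rest) from rfl]
  rw [aStep_eq _ _ _ (by simp; omega), aStep_eq _ _ _ h]
  have hg : PySem.List.pyGet? m (((loc+1 : Nat)) : Int) = PySem.List.pyGet? (m.drop 1) ((loc : Nat) : Int) := by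
    rw [PySem.List.pyGet?_natCast, PySem.List.pyGet?_natCast, List.getElem?_drop]
    norm_num [Nat.add_comm]
  rw [hg]
  simp

theorem aWhile_zero (m : List Int) (sen : List String) :
    aWhile m 0 sen = List.replicate ((PySem.List.pyGet? m 0).getD 0).toNat "[MASK]" ++ sen := by
  have := aStep_eq m 0 sen (by simp)
  simpa [aWhile] using this

theorem aWhile_cons (m : List Int) : ∀ (loc : Nat) (t : String) (rest : List String), loc ≤ rest.length →
    aWhile m (loc + 1) (t :: rest) =
      List.replicate ((PySem.List.pyGet? m 0).getD 0).toNat "[MASK]" ++ t :: aWhile (m.drop 1) loc rest := by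
  intro loc
  induction loc with
  | zero =>
    intro t rest h
    show aWhile m 0 (aStep m 1 (t :: rest)) = _
    rw [show (1 : Nat) = 0 + 1 from rfl, aStep_cons m 0 t rest (by omega)]
    rw [aWhile_zero, aWhile_zero, aStep_eq _ 0 _ (by simp)]
    simp
  | succ loc ih =>
    intro t rest h
    show aWhile m (loc + 1) (aStep m (loc + 1 + 1) (t :: rest)) = _
    rw [aStep_cons m (loc + 1) t rest h]
    rw [ih _ _ (by rw [aStep_eq _ _ _ h]; simp; omega)]
    rfl

theorem aWhile_render : ∀ (ts : List String) (m : List Int), m.length = ts.length + 1 →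
    aWhile m ts.length ts = render m ts := by
  intro ts
  induction ts with
  | nil =>
    intro m hm
    match m, hm with
    | [k], _ =>
      rw [show ([] : List String).length = 0 from rfl, aWhile_zero]
      simp [render]
  | cons t ts ih =>
    intro m hm
    match m, hm with
    | k :: m', hm =>
      rw [show (t :: ts).length = ts.length + 1 from rfl,
          aWhile_cons _ _ _ _ (le_refl _)]
      simp only [List.drop_one, List.tail_cons]
      rw [ih m' (by simpa using hm)]
      simp [render]

theorem flatMap_congr_mem {α β : Type} (l : List α) (G H : α → List β) (h : ∀ x ∈ l, G x = H x) :
    l.flatMap G = l.flatMap H := by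
  simp only [List.flatMap_def]
  exact congrArg List.flatten (List.map_congr_left h)

theorem goB_eq (mm : Int) : ∀ (rest prefixToks : List String),
    goB mm rest prefixToks =
      (prodA (PySem.List.pyRange 0 (mm + 1) 1) (rest.length + 1)).map
        (fun m => PySem.Str.join " " (prefixToks ++ render m rest ++ ["."])) := by
  intro rest
  induction rest with
  | nil =>
    intro p
    rw [goB, PySem.List.foldl_append_eq_flatMap, List.nil_append]
    conv_rhs => rw [show prodA (PySem.List.pyRange 0 (mm + 1) 1) ((List.nil (α := String)).length + 1)
      = (PySem.List.pyRange 0 (mm + 1) 1).flatMap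
          (fun x => (prodA (PySem.List.pyRange 0 (mm + 1) 1) 0).map (fun t => x :: t)) from rfl]
    rw [List.map_flatMap]
    apply flatMap_congr_mem
    intro k _
    simp [prodA, render]
  | cons t rs ih =>
    intro p
    rw [goB, PySem.List.foldl_append_eq_flatMap, List.nil_append]
    conv_rhs => rw [show prodA (PySem.List.pyRange 0 (mm + 1) 1) ((t :: rs).length + 1)
      = (PySem.List.pyRange 0 (mm + 1) 1).flatMap
          (fun x => (prodA (PySem.List.pyRange 0 (mm + 1) 1) (rs.length + 1)).map (fun u => x :: u)) from rfl]
    rw [List.map_flatMap]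
    apply flatMap_congr_mem
    intro k _
    rw [show (match t :: rs with
        | t :: rs => goB mm rs (p ++ List.replicate k.toNat "[MASK]" ++ [t])
        | [] => [PySem.Str.join " " (p ++ List.replicate k.toNat "[MASK]" ++ ["."])])
      = goB mm rs (p ++ List.replicate k.toNat "[MASK]" ++ [t]) from rfl]
    rw [ih, List.map_map]
    apply List.map_congr_left
    intro m _
    simp [render]

-- ===== VERDICT (by name: the statement is the Claim_ definition above) =====
theorem E2S_spec : Claim_equal_E2S := by
  intro event mm _
  unfold Spec_E2S E2S E2S_alt
  simp only []
  rw [PySem.List.foldl_append_singleton_eq_map, List.nil_append, goB_eq]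
  apply List.map_congr_left
  intro m hm
  rw [aWhile_render _ m (prodA_length hm)]
  simp
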